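-- pv_equiv track=rewrite | github.com/ajecc/poker-user-dll | util/hand_prwin_builder.py | is_valid_game
-- ===== SOURCE A (Python) =====
-- def get_extended_board(hand, board):
--     board_aux = []
--     board_aux.extend(hand)
--     board_aux.extend(board)
--     return board_aux
--
-- def is_valid_game(lhs, rhs, board):
--     board_ext = get_extended_board(lhs, board)
--     board_ext = get_extended_board(rhs, board_ext)
--     board_ext = [str(elem) for elem in board_ext]
--     board_ext_aux = list(set(board_ext))
--     if len(board_ext_aux) != len(board_ext):
--         return False
--     return True
-- ===== SOURCE B (Python) =====
-- def is_valid_game(lhs, rhs, board):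
--     keys = sorted(str(e) for e in rhs + lhs + board)
--     for i in range(1, len(keys)):
--         if keys[i - 1] == keys[i]:
--             return False
--     return True
-- ===== Notes on version B (the rewrite author's own statement) =====
-- stated objective: alternative
-- what changed: Replaces A's build-a-set-and-compare-lengths duplicate test with a sort-then-adjacent-scan: sort the combined card strings and return False on the first equal neighbouring pair.
import Mathlib
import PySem

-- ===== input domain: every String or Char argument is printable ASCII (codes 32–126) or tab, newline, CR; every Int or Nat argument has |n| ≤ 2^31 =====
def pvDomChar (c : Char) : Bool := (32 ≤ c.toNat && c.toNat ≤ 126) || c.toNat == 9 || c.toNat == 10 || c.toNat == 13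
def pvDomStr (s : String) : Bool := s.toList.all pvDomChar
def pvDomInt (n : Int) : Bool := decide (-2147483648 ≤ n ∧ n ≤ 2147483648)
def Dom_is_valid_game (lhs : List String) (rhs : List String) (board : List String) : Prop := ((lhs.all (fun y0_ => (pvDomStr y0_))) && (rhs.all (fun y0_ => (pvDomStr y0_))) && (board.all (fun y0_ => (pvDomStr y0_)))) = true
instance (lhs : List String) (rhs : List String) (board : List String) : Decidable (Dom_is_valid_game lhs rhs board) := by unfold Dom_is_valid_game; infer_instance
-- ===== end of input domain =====

-- B replaces A's set-length duplicate test with a sort-then-adjacent-scan; alternative (not faster).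

-- ===== PORT A =====
def get_extended_board (hand : List String) (board : List String) : List String :=
  let board_aux : List String := []
  let board_aux := board_aux ++ hand
  let board_aux := board_aux ++ board
  board_aux

def is_valid_game (lhs : List String) (rhs : List String) (board : List String) : Bool :=
  let board_ext := get_extended_board lhs board
  let board_ext := get_extended_board rhs board_ext
  let board_ext := board_ext.map (fun elem => elem)  -- str(elem) on a str is the identity
  let board_ext_aux := PySem.Set.ofList board_ext    -- list(set(...)): only its length is used, order-independent
  if board_ext_aux.length ≠ board_ext.length then false else true

-- ===== PORT B =====
-- the 'for i in range(1, len(keys))' adjacent scan, as structural recursion over the sorted list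
def pvAdjScan : List String → Bool
  | a :: b :: t => if a == b then false else pvAdjScan (b :: t)
  | _ => true

def is_valid_game_alt (lhs : List String) (rhs : List String) (board : List String) : Bool :=
  let keys := PySem.List.sorted ((rhs ++ lhs ++ board).map (fun e => e)) (fun x => x) false
  pvAdjScan keys

-- ===== PRECONDITION & SPEC =====
def Spec_is_valid_game (lhs : List String) (rhs : List String) (board : List String) (out : Bool) : Prop := out = is_valid_game_alt lhs rhs board
instance (lhs : List String) (rhs : List String) (board : List String) (out : Bool) : Decidable (Spec_is_valid_game lhs rhs board out) := by unfold Spec_is_valid_game; infer_instance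

-- ===== CLAIM (what is proved, stated in full; the proofs are below) =====
def Claim_equal_is_valid_game : Prop := ∀ (lhs : List String) (rhs : List String) (board : List String), Dom_is_valid_game lhs rhs board → Spec_is_valid_game lhs rhs board (is_valid_game lhs rhs board)

-- ===== LEMMAS AND PROOFS =====

-- set(xs) (first occurrences) is a sublist of xs
theorem pv_ofList_sublist {α : Type} [BEq α] [LawfulBEq α] : ∀ xs : List α, (PySem.Set.ofList xs).Sublist xs := by
  intro xs
  induction xs with
  | nil => simp [PySem.Set.ofList_nil]
  | cons x xs ih =>
    rw [PySem.Set.ofList_cons]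
    exact List.Sublist.cons₂ x ((List.filter_sublist.trans ih))

theorem pv_A_true_iff (lhs rhs board : List String) :
    is_valid_game lhs rhs board = true ↔ (rhs ++ lhs ++ board).Nodup := by
  unfold is_valid_game get_extended_board
  simp only [List.nil_append, List.map_id_fun', id_eq]
  constructor
  · intro h
    by_cases hl : (PySem.Set.ofList (rhs ++ (lhs ++ board))).length = (rhs ++ (lhs ++ board)).length
    · have heq := List.Sublist.eq_of_length (pv_ofList_sublist (rhs ++ (lhs ++ board))) hl
      have hn := PySem.Set.nodup_ofList (rhs ++ (lhs ++ board))
      rw [heq] at hn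
      simpa [List.append_assoc] using hn
    · rw [if_pos hl] at h
      cases h
  · intro hn
    have hn' : (rhs ++ (lhs ++ board)).Nodup := by simpa [List.append_assoc] using hn
    rw [PySem.Set.ofList_eq_self_of_nodup _ hn']
    simp

theorem pv_adjScan_iff_chain' : ∀ l : List String, pvAdjScan l = true ↔ l.IsChain (· ≠ ·) := by
  intro l
  induction l with
  | nil => simp [pvAdjScan]
  | cons a t ih =>
    cases t with
    | nil => simp [pvAdjScan, List.isChain_singleton a]
    | cons b t' =>
      rw [pvAdjScan]
      by_cases hab : a = b
      · simp [hab, List.isChain_cons_cons]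
      · simp only [beq_iff_eq, hab, if_false, List.isChain_cons_cons, ih]
        tauto

theorem pv_chain'_lt : ∀ l : List String, l.IsChain (· ≠ ·) → l.IsChain (· ≤ ·) → l.IsChain (· < ·) := by
  intro l
  induction l with
  | nil => exact fun _ _ => List.isChain_nil
  | cons a t ih =>
    cases t with
    | nil => exact fun _ _ => List.isChain_singleton a
    | cons b t' =>
      simp only [List.isChain_cons_cons]
      rintro ⟨hne, hc1⟩ ⟨hle, hc2⟩
      exact ⟨lt_of_le_of_ne hle hne, ih hc1 hc2⟩

theorem pv_B_true_iff (lhs rhs board : List String) :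
    is_valid_game_alt lhs rhs board = true ↔ (rhs ++ lhs ++ board).Nodup := by
  unfold is_valid_game_alt
  simp only [List.map_id_fun', id_eq]
  rw [pv_adjScan_iff_chain']
  have hperm := PySem.List.sorted_perm (rhs ++ lhs ++ board) (fun x => x) false
  constructor
  · intro hc
    have hpw := PySem.List.sorted_pairwise (rhs ++ lhs ++ board) (fun x => x)
    have hlt := pv_chain'_lt _ hc (hpw.isChain)
    have : (PySem.List.sorted (rhs ++ lhs ++ board) (fun x => x) false).Pairwise (· < ·) :=
      List.isChain_iff_pairwise.mp hlt
    exact hperm.nodup_iff.mp (this.imp fun h => ne_of_lt h)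
  · intro hn
    exact (hperm.nodup_iff.mpr hn).isChain

-- ===== VERDICT (by name: the statement is the Claim_ definition above) =====
theorem is_valid_game_spec : Claim_equal_is_valid_game := by
  intro lhs rhs board _
  unfold Spec_is_valid_game
  rw [Bool.eq_iff_iff, pv_A_true_iff, pv_B_true_iff]
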